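-- pv_equiv track=rewrite | github.com/LeonDragon/AutoMQA | helper/est_answer_area.py | infer_answer_area_expanding_box
-- ===== SOURCE A (Python) =====
-- def infer_answer_area_expanding_box(bubble_coords):
--     """Infers the answer area using an expanding bounding box."""
--
--     if not bubble_coords:
--         return None
--
--     # Select initial bubbles
--     bubble_coords.sort(key=lambda coord: (coord[0], coord[1]))  # Sort by x, then y
--     top_left = bubble_coords[0]
--     bottom_right = bubble_coords[-1]
--
--     # Initial bounding box
--     x_min, y_min = top_left[0], top_left[1]
--     x_max, y_max = bottom_right[0] + bottom_right[2], bottom_right[1] + bottom_right[3]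
--
--     expansion_increment = 10  # Adjust this increment
--     max_iterations = 50  # Adjust this limit
--     previous_count = 0
--     stable_count = 0
--     stability_threshold = 3  # Adjust this threshold
--
--     for _ in range(max_iterations):
--         bubble_count = 0
--         for x, y, w, h in bubble_coords:
--             if x_min <= x and y_min <= y and x + w <= x_max and y + h <= y_max:
--                 bubble_count += 1
--
--         if bubble_count == previous_count:
--             stable_count += 1
--         else:
--             stable_count = 0
--         previous_count = bubble_count
--
--         if stable_count >= stability_threshold:
--             break
--
--         # Expand the box
--         x_min -= expansion_increment
--         y_min -= expansion_increment
--         x_max += expansion_increment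
--         y_max += expansion_increment
--
--     return x_min, y_min, x_max, y_max
-- ===== SOURCE B (Python) =====
-- # B: one pass computes each bubble's entry level (the first expansion step at which
-- # it fits in the box); a 50-bucket histogram + prefix sums give the per-level counts,
-- # and the same stability machine then runs on the table instead of rescanning bubbles.
-- # Like A, sorts bubble_coords in place; equivalence is about the return value.
--
-- def _entry_level(x_min, y_min, x_max, y_max, coord):
--     x, y, w, h = coord
--     d = max(x_min - x, y_min - y, x + w - x_max, y + h - y_max)
--     t = -(-d // 10)
--     if t < 0:
--         t = 0
--     return t
--
-- def _prefix_sums(hist):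
--     counts = []
--     running = 0
--     for c in hist:
--         running += c
--         counts.append(running)
--     return counts
--
-- def infer_answer_area_expanding_box(bubble_coords):
--     if not bubble_coords:
--         return None
--
--     bubble_coords.sort(key=lambda coord: (coord[0], coord[1]))
--     top_left = bubble_coords[0]
--     bottom_right = bubble_coords[-1]
--     x_min, y_min = top_left[0], top_left[1]
--     x_max, y_max = bottom_right[0] + bottom_right[2], bottom_right[1] + bottom_right[3]
--
--     hist = [0] * 50
--     for coord in bubble_coords:
--         t = _entry_level(x_min, y_min, x_max, y_max, coord)
--         if t < 50:
--             hist[t] += 1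
--     counts = _prefix_sums(hist)
--
--     previous_count = 0
--     stable_count = 0
--     level = 50
--     for k, c in enumerate(counts):
--         if c == previous_count:
--             stable_count += 1
--         else:
--             stable_count = 0
--         previous_count = c
--         if stable_count >= 3:
--             level = k
--             break
--
--     e = 10 * level
--     return x_min - e, y_min - e, x_max + e, y_max + e
-- ===== Notes on version B (the rewrite author's own statement) =====
-- stated objective: faster
-- what changed: Instead of rescanning all bubbles against the box on each of up to 50 expansion iterations, B computes each bubble's entry level (first expansion step at which it fits) in one pass, builds a 50-bucket histogram with prefix sums, and runs the same stability state machine over that count table.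
import Mathlib
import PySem

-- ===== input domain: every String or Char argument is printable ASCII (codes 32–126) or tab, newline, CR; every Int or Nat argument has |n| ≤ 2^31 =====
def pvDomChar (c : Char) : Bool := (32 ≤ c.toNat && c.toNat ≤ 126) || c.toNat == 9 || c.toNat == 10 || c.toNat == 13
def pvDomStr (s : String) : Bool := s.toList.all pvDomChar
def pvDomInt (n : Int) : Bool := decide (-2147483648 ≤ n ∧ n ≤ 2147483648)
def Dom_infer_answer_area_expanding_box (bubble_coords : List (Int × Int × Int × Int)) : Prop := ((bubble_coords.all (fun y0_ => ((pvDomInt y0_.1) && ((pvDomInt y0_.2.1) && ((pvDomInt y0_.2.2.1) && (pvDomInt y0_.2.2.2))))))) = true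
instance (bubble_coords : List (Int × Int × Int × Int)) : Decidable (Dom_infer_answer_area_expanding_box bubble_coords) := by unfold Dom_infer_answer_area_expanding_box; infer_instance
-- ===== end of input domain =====

-- B replaces A's repeated rescans of the bubbles by one pass computing each bubble's
-- entry level, a 50-bucket histogram with prefix sums, and the same stability machine
-- reading counts from the table. Both A and B sort bubble_coords in place in Python;
-- the equivalence proved here is about the return value.

-- ===== PORT A =====
-- inner 'for x, y, w, h in bubble_coords' counting loop of A
def pvAScan (bs : List (Int × Int × Int × Int)) (xmin ymin xmax ymax : Int) : Int :=
  bs.foldl (fun acc c =>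
    if xmin ≤ c.1 ∧ ymin ≤ c.2.1 ∧ c.1 + c.2.2.1 ≤ xmax ∧ c.2.1 + c.2.2.2 ≤ ymax
    then acc + 1 else acc) 0

-- A's 'for _ in range(max_iterations)' loop with its break, as structural recursion on the remaining iterations
def pvALoop (bs : List (Int × Int × Int × Int)) : Nat → Int → Int → Int → Int → Int → Int → Int × Int × Int × Int
  | 0, xmin, ymin, xmax, ymax, _, _ => (xmin, ymin, xmax, ymax)
  | fuel+1, xmin, ymin, xmax, ymax, prev, stable =>
    let cnt := pvAScan bs xmin ymin xmax ymax
    let stable' := if cnt = prev then stable + 1 else 0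
    if stable' ≥ 3 then (xmin, ymin, xmax, ymax)
    else pvALoop bs fuel (xmin - 10) (ymin - 10) (xmax + 10) (ymax + 10) cnt stable'

def infer_answer_area_expanding_box (bubble_coords : List (Int × Int × Int × Int)) : Option (Int × Int × Int × Int) :=
  if bubble_coords.isEmpty then none
  else
    let s := PySem.List.sorted2 bubble_coords (fun c => c.1) (fun c => c.2.1)
    let tl := PySem.List.pyGetD s 0 (0, 0, 0, 0)      -- s[0]; s is nonempty so the default is never used
    let br := PySem.List.pyGetD s (-1) (0, 0, 0, 0)   -- s[-1]
    some (pvALoop s 50 tl.1 tl.2.1 (br.1 + br.2.2.1) (br.2.1 + br.2.2.2) 0 0)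

-- ===== PORT B =====
-- Source B's _entry_level: first expansion step at which the bubble fits in the box
def pvEntryLevel (xmin ymin xmax ymax : Int) (c : Int × Int × Int × Int) : Int :=
  let d := max (max (max (xmin - c.1) (ymin - c.2.1)) (c.1 + c.2.2.1 - xmax)) (c.2.1 + c.2.2.2 - ymax)
  let t := -(PySem.Int.floordiv (-d) 10)
  if t < 0 then 0 else t

-- Source B's histogram loop ('hist = [0]*50; for coord in ...: hist[t] += 1')
def pvBHist (bs : List (Int × Int × Int × Int)) (xmin ymin xmax ymax : Int) : List Int :=
  bs.foldl (fun hist c =>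
    let t := pvEntryLevel xmin ymin xmax ymax c
    if t < 50 then hist.modify t.toNat (· + 1) else hist) (List.replicate 50 0)

-- Source B's _prefix_sums
def pvPrefixSums : List Int → Int → List Int
  | [], _ => []
  | c :: rest, running => (running + c) :: pvPrefixSums rest (running + c)

-- Source B's 'for k, c in enumerate(counts)' stability machine; returns the expansion level
def pvBMach : List Int → Nat → Int → Int → Nat
  | [], _, _, _ => 50
  | c :: rest, k, prev, stable =>
    let stable' := if c = prev then stable + 1 else 0
    if stable' ≥ 3 then k
    else pvBMach rest (k + 1) c stable'

def infer_answer_area_expanding_box_alt (bubble_coords : List (Int × Int × Int × Int)) : Option (Int × Int × Int × Int) :=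
  if bubble_coords.isEmpty then none
  else
    let s := PySem.List.sorted2 bubble_coords (fun c => c.1) (fun c => c.2.1)
    let tl := PySem.List.pyGetD s 0 (0, 0, 0, 0)
    let br := PySem.List.pyGetD s (-1) (0, 0, 0, 0)
    let xmin := tl.1
    let ymin := tl.2.1
    let xmax := br.1 + br.2.2.1
    let ymax := br.2.1 + br.2.2.2
    let counts := pvPrefixSums (pvBHist s xmin ymin xmax ymax) 0
    let level := pvBMach counts 0 0 0
    some (xmin - 10 * (level : Int), ymin - 10 * (level : Int), xmax + 10 * (level : Int), ymax + 10 * (level : Int))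

-- ===== PRECONDITION & SPEC =====
def Spec_infer_answer_area_expanding_box (bubble_coords : List (Int × Int × Int × Int)) (out : Option (Int × Int × Int × Int)) : Prop := out = infer_answer_area_expanding_box_alt bubble_coords
instance (bubble_coords : List (Int × Int × Int × Int)) (out : Option (Int × Int × Int × Int)) : Decidable (Spec_infer_answer_area_expanding_box bubble_coords out) := by unfold Spec_infer_answer_area_expanding_box; infer_instance

-- ===== CLAIM (what is proved, stated in full; the proofs are below) =====
def Claim_equal_infer_answer_area_expanding_box : Prop := ∀ (bubble_coords : List (Int × Int × Int × Int)), Dom_infer_answer_area_expanding_box bubble_coords → Spec_infer_answer_area_expanding_box bubble_coords (infer_answer_area_expanding_box bubble_coords)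

-- ===== LEMMAS AND PROOFS =====

-- a bubble is inside the box expanded k times  ↔  its entry level is ≤ k
lemma pv_cond_iff_level (xm ym xM yM : Int) (c : Int × Int × Int × Int) (k : Nat) :
    (xm - 10 * (k : Int) ≤ c.1 ∧ ym - 10 * (k : Int) ≤ c.2.1 ∧
     c.1 + c.2.2.1 ≤ xM + 10 * (k : Int) ∧ c.2.1 + c.2.2.2 ≤ yM + 10 * (k : Int))
      ↔ pvEntryLevel xm ym xM yM c ≤ (k : Int) := by
  simp only [pvEntryLevel]
  rw [PySem.Int.floordiv_eq_ediv_of_pos (by norm_num : (0:Int) < 10)]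
  split_ifs with h <;> omega

lemma pvEntryLevel_nonneg (xm ym xM yM : Int) (c : Int × Int × Int × Int) :
    0 ≤ pvEntryLevel xm ym xM yM c := by
  simp only [pvEntryLevel]
  split_ifs with h <;> omega

lemma pv_scan_aux (xm ym xM yM : Int) (k : Nat) (bs : List (Int × Int × Int × Int)) :
    ∀ acc : Int,
    bs.foldl (fun acc c =>
        if xm - 10 * (k : Int) ≤ c.1 ∧ ym - 10 * (k : Int) ≤ c.2.1 ∧
           c.1 + c.2.2.1 ≤ xM + 10 * (k : Int) ∧ c.2.1 + c.2.2.2 ≤ yM + 10 * (k : Int)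
        then acc + 1 else acc) acc
      = acc + ((bs.countP fun c => decide (pvEntryLevel xm ym xM yM c ≤ (k : Int))) : Int) := by
  induction bs with
  | nil => intro acc; simp
  | cons c t ih =>
    intro acc
    simp only [List.foldl_cons, List.countP_cons]
    by_cases h : pvEntryLevel xm ym xM yM c ≤ (k : Int)
    · rw [if_pos ((pv_cond_iff_level xm ym xM yM c k).2 h), ih]
      simp [h]
      ring
    · rw [if_neg (fun hc => h ((pv_cond_iff_level xm ym xM yM c k).1 hc)), ih]
      simp [h]

lemma pv_scan_eq (xm ym xM yM : Int) (k : Nat) (bs : List (Int × Int × Int × Int)) :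
    pvAScan bs (xm - 10 * (k : Int)) (ym - 10 * (k : Int)) (xM + 10 * (k : Int)) (yM + 10 * (k : Int))
      = ((bs.countP fun c => decide (pvEntryLevel xm ym xM yM c ≤ (k : Int))) : Int) := by
  unfold pvAScan
  rw [pv_scan_aux]
  ring

lemma pv_getD_modify (l : List Int) (i j : Nat) (hj : j < l.length) :
    (l.modify i (· + 1)).getD j 0 = if i = j then l.getD j 0 + 1 else l.getD j 0 := by
  rw [List.getD_eq_getElem _ _ (by rw [List.length_modify]; exact hj),
      List.getD_eq_getElem _ _ hj, List.getElem_modify]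

lemma pv_hist_len_aux (xm ym xM yM : Int) :
    ∀ (bs : List (Int × Int × Int × Int)) (hist : List Int),
    (bs.foldl (fun hist c =>
        let t := pvEntryLevel xm ym xM yM c
        if t < 50 then hist.modify t.toNat (· + 1) else hist) hist).length = hist.length := by
  intro bs
  induction bs with
  | nil => intro hist; rfl
  | cons c t ih =>
    intro hist
    rw [List.foldl_cons, ih]
    dsimp only
    split <;> simp [List.length_modify]

lemma pv_hist_getD_aux (xm ym xM yM : Int) (j : Nat) (hj : j < 50) :
    ∀ (bs : List (Int × Int × Int × Int)) (hist : List Int), hist.length = 50 →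
    ((bs.foldl (fun hist c =>
        let t := pvEntryLevel xm ym xM yM c
        if t < 50 then hist.modify t.toNat (· + 1) else hist) hist).getD j 0)
      = hist.getD j 0 + ((bs.countP fun c => decide (pvEntryLevel xm ym xM yM c = (j : Int))) : Int) := by
  intro bs
  induction bs with
  | nil => intro hist _; simp
  | cons c t ih =>
    intro hist hlen
    rw [List.foldl_cons, List.countP_cons]
    have hnn := pvEntryLevel_nonneg xm ym xM yM c
    have hstep : ((if pvEntryLevel xm ym xM yM c < 50 then
          hist.modify (pvEntryLevel xm ym xM yM c).toNat (· + 1) else hist) : List Int).length = 50 := by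
      split <;> simp [List.length_modify, hlen]
    rw [ih _ hstep]
    by_cases hq : pvEntryLevel xm ym xM yM c = (j : Int)
    · have hlt : pvEntryLevel xm ym xM yM c < 50 := by omega
      have htn : (pvEntryLevel xm ym xM yM c).toNat = j := by omega
      rw [if_pos hlt, htn, pv_getD_modify _ _ _ (by omega), if_pos rfl]
      simp [hq]
      ring
    · have : ((if pvEntryLevel xm ym xM yM c < 50 then
          hist.modify (pvEntryLevel xm ym xM yM c).toNat (· + 1) else hist) : List Int).getD j 0 = hist.getD j 0 := by
        split
        · rw [pv_getD_modify _ _ _ (by omega), if_neg (by omega)]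
        · rfl
      rw [this]
      simp [hq]

lemma pvBHist_length (bs : List (Int × Int × Int × Int)) (xm ym xM yM : Int) :
    (pvBHist bs xm ym xM yM).length = 50 := by
  unfold pvBHist
  rw [pv_hist_len_aux]
  simp

lemma pvBHist_getD (bs : List (Int × Int × Int × Int)) (xm ym xM yM : Int) (j : Nat) (hj : j < 50) :
    (pvBHist bs xm ym xM yM).getD j 0
      = ((bs.countP fun c => decide (pvEntryLevel xm ym xM yM c = (j : Int))) : Int) := by
  unfold pvBHist
  rw [pv_hist_getD_aux xm ym xM yM j hj _ _ (by simp)]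
  rw [List.getD_replicate _ hj]
  ring

lemma pvPrefixSums_length : ∀ (l : List Int) (r : Int), (pvPrefixSums l r).length = l.length := by
  intro l
  induction l with
  | nil => intro r; rfl
  | cons c t ih => intro r; simp [pvPrefixSums, ih]

lemma pvPrefixSums_getD : ∀ (l : List Int) (r : Int) (k : Nat), k < l.length →
    (pvPrefixSums l r).getD k 0 = r + ((l.take (k+1)).sum) := by
  intro l
  induction l with
  | nil => intro r k hk; simp at hk
  | cons c t ih =>
    intro r k hk
    cases k with
    | zero => simp [pvPrefixSums]
    | succ m =>
      rw [List.take_succ_cons, List.sum_cons]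
      simp only [pvPrefixSums, List.getD_cons_succ]
      rw [ih (r + c) m (by simpa using hk)]
      ring

lemma pv_take_sum : ∀ (l : List Int) (n : Nat), n ≤ l.length →
    (l.take n).sum = ∑ j ∈ Finset.range n, l.getD j 0 := by
  intro l
  induction l with
  | nil =>
    intro n hn
    have : n = 0 := by simpa using hn
    subst this
    simp
  | cons c t ih =>
    intro n hn
    cases n with
    | zero => simp
    | succ m =>
      rw [List.take_succ_cons, List.sum_cons, Finset.sum_range_succ']
      simp only [List.getD_cons_succ, List.getD_cons_zero]
      rw [ih m (by simpa using hn)]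
      ring

lemma pv_countP_split (xm ym xM yM : Int) (k : Nat) (bs : List (Int × Int × Int × Int)) :
    (bs.countP fun c => decide (pvEntryLevel xm ym xM yM c ≤ (k : Int) + 1))
      = (bs.countP fun c => decide (pvEntryLevel xm ym xM yM c ≤ (k : Int)))
        + (bs.countP fun c => decide (pvEntryLevel xm ym xM yM c = (k : Int) + 1)) := by
  induction bs with
  | nil => rfl
  | cons c t ih =>
    simp only [List.countP_cons]
    rw [ih]
    have hnn := pvEntryLevel_nonneg xm ym xM yM c
    by_cases h1 : pvEntryLevel xm ym xM yM c ≤ (k : Int) <;>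
      by_cases h2 : pvEntryLevel xm ym xM yM c = (k : Int) + 1
    · omega
    · have h0 : pvEntryLevel xm ym xM yM c ≤ (k : Int) + 1 := by omega
      simp [h0, h1, h2]
      omega
    · have h0 : pvEntryLevel xm ym xM yM c ≤ (k : Int) + 1 := by omega
      simp [h0, h1, h2]
      omega
    · have h0 : ¬ pvEntryLevel xm ym xM yM c ≤ (k : Int) + 1 := by omega
      simp [h0, h1, h2]

lemma pv_bucket_sum (xm ym xM yM : Int) (bs : List (Int × Int × Int × Int)) : ∀ (k : Nat),
    (∑ j ∈ Finset.range (k+1), ((bs.countP fun c => decide (pvEntryLevel xm ym xM yM c = (j : Int))) : Int))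
      = ((bs.countP fun c => decide (pvEntryLevel xm ym xM yM c ≤ (k : Int))) : Int) := by
  intro k
  induction k with
  | zero =>
    rw [show (0:Nat) + 1 = 1 from rfl, Finset.sum_range_one]
    simp only [Nat.cast_zero]
    congr 1
    apply List.countP_congr
    intro c _
    have := pvEntryLevel_nonneg xm ym xM yM c
    simp only [decide_eq_true_eq]
    omega
  | succ m ih =>
    rw [Finset.sum_range_succ, ih]
    have hc : ((m + 1 : Nat) : Int) = (m : Int) + 1 := by push_cast; ring
    simp only [hc]
    exact_mod_cast (pv_countP_split xm ym xM yM m bs).symm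

lemma pv_counts_eq (xm ym xM yM : Int) (bs : List (Int × Int × Int × Int)) :
    pvPrefixSums (pvBHist bs xm ym xM yM) 0
      = (List.range 50).map fun (k : Nat) => ((bs.countP fun c => decide (pvEntryLevel xm ym xM yM c ≤ (k : Int))) : Int) := by
  apply List.ext_getElem
  · rw [pvPrefixSums_length, pvBHist_length]; simp
  · intro k hk1 hk2
    have hk : k < 50 := by
      rw [pvPrefixSums_length, pvBHist_length] at hk1; exact hk1
    rw [List.getElem_map, List.getElem_range]
    rw [← List.getD_eq_getElem _ 0 hk1,
        pvPrefixSums_getD _ _ _ (by rw [pvBHist_length]; exact hk),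
        pv_take_sum _ _ (by rw [pvBHist_length]; omega)]
    rw [Finset.sum_congr rfl (fun j hj => pvBHist_getD bs xm ym xM yM j
          (by have := Finset.mem_range.1 hj; omega))]
    rw [pv_bucket_sum]
    ring

lemma pv_mach_eq (bs : List (Int × Int × Int × Int)) (xm ym xM yM : Int) :
    ∀ (fuel k : Nat) (prev stable : Int), k + fuel = 50 →
    pvALoop bs fuel (xm - 10 * (k : Int)) (ym - 10 * (k : Int)) (xM + 10 * (k : Int)) (yM + 10 * (k : Int)) prev stable
      = (let l := pvBMach ((List.range' k fuel).map fun (j : Nat) =>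
            ((bs.countP fun c => decide (pvEntryLevel xm ym xM yM c ≤ (j : Int))) : Int)) k prev stable
         (xm - 10 * (l : Int), ym - 10 * (l : Int), xM + 10 * (l : Int), yM + 10 * (l : Int))) := by
  intro fuel
  induction fuel with
  | zero =>
    intro k prev stable hk
    have hk50 : k = 50 := by omega
    subst hk50
    simp [pvALoop, pvBMach]
  | succ m ih =>
    intro k prev stable hk
    have e1 : xm - 10 * (k : Int) - 10 = xm - 10 * ((k + 1 : Nat) : Int) := by push_cast; ring
    have e2 : ym - 10 * (k : Int) - 10 = ym - 10 * ((k + 1 : Nat) : Int) := by push_cast; ring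
    have e3 : xM + 10 * (k : Int) + 10 = xM + 10 * ((k + 1 : Nat) : Int) := by push_cast; ring
    have e4 : yM + 10 * (k : Int) + 10 = yM + 10 * ((k + 1 : Nat) : Int) := by push_cast; ring
    simp only [List.range'_succ, List.map_cons, pvALoop, pvBMach, pv_scan_eq]
    split_ifs <;>
      first
        | rfl
        | (exfalso; omega)
        | omega
        | (rw [e1, e2, e3, e4]
           have h := ih (k + 1) ((bs.countP fun c => decide (pvEntryLevel xm ym xM yM c ≤ (k : Int))) : Int) (stable + 1) (by omega)
           simpa using h)
        | (rw [e1, e2, e3, e4]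
           have h := ih (k + 1) ((bs.countP fun c => decide (pvEntryLevel xm ym xM yM c ≤ (k : Int))) : Int) 0 (by omega)
           simpa using h)

-- ===== VERDICT (by name: the statement is the Claim_ definition above) =====
theorem infer_answer_area_expanding_box_spec : Claim_equal_infer_answer_area_expanding_box := by
  intro bc _
  unfold Spec_infer_answer_area_expanding_box
  cases bc with
  | nil => rfl
  | cons b t =>
    simp only [infer_answer_area_expanding_box, infer_answer_area_expanding_box_alt]
    rw [if_neg (by simp), if_neg (by simp)]
    rw [pv_counts_eq]
    have h := pv_mach_eq (PySem.List.sorted2 (b :: t) (fun c => c.1) (fun c => c.2.1))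
      (PySem.List.pyGetD (PySem.List.sorted2 (b :: t) (fun c => c.1) (fun c => c.2.1)) 0 (0,0,0,0)).1
      (PySem.List.pyGetD (PySem.List.sorted2 (b :: t) (fun c => c.1) (fun c => c.2.1)) 0 (0,0,0,0)).2.1
      ((PySem.List.pyGetD (PySem.List.sorted2 (b :: t) (fun c => c.1) (fun c => c.2.1)) (-1) (0,0,0,0)).1
        + (PySem.List.pyGetD (PySem.List.sorted2 (b :: t) (fun c => c.1) (fun c => c.2.1)) (-1) (0,0,0,0)).2.2.1)
      ((PySem.List.pyGetD (PySem.List.sorted2 (b :: t) (fun c => c.1) (fun c => c.2.1)) (-1) (0,0,0,0)).2.1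
        + (PySem.List.pyGetD (PySem.List.sorted2 (b :: t) (fun c => c.1) (fun c => c.2.1)) (-1) (0,0,0,0)).2.2.2)
      50 0 0 0 (by omega)
    simp only [Nat.cast_zero, mul_zero, sub_zero, add_zero, ← List.range_eq_range'] at h
    rw [h]
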